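-- pv_equiv track=rewrite | github.com/shaiksyedali/agent-framework | azure-functions/shared_code/document_intelligence.py | get_entities_for_chunk
-- ===== SOURCE A (Python) =====
-- from typing import List, Dict, Any, Optional, Tuple
--
-- def get_entities_for_chunk(
--     chunk_content: str,
--     all_entities: List[Dict],
--     structured_phrases: set
-- ) -> List[Dict]:
--     """
--     Get Document Intelligence entities that appear in a specific chunk.
--
--     Since Doc Intel extracts entities from the entire document, this filters
--     to only include entities that actually appear in this chunk.
--
--     Args:
--         chunk_content: The text content of the chunk
--         all_entities: All entities extracted by Document Intelligence
--         structured_phrases: Set of entity names for fast lookup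
--
--     Returns:
--         List of entities that appear in this chunk
--     """
--     chunk_lower = chunk_content.lower()
--     chunk_entities = []
--     seen = set()
--
--     for entity in all_entities:
--         name = entity.get("name", "").strip()
--         name_lower = name.lower()
--
--         # Check if entity appears in chunk
--         if name_lower in chunk_lower and name_lower not in seen:
--             chunk_entities.append(entity)
--             seen.add(name_lower)
--
--     return chunk_entities
-- ===== SOURCE B (Python) =====
-- from typing import List, Dict, Any, Optional, Tuple
--
-- def get_entities_for_chunk(
--     chunk_content: str,
--     all_entities: List[Dict],
--     structured_phrases: set
-- ) -> List[Dict]: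
--     # Pass 1: keep the first entity for each distinct lowercased stripped name,
--     # in order of first appearance (ordered dict).  Pass 2: run the substring
--     # test once per DISTINCT name instead of once per entity.
--     chunk_lower = chunk_content.lower()
--     first = {}
--     for entity in all_entities:
--         key = entity.get("name", "").strip().lower()
--         if key not in first:
--             first[key] = entity
--     return [entity for key, entity in first.items() if key in chunk_lower]
-- ===== Notes on version B (the rewrite author's own statement) =====
-- stated objective: alternative
-- what changed: B first dedups entities by lowercased stripped name into an ordered dict (one pass), then filters the distinct names by one substring test each, instead of A's single pass that interleaves a substring test per entity with a seen-set; the substring scan runs once per distinct name rather than once per entity.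
import Mathlib
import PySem

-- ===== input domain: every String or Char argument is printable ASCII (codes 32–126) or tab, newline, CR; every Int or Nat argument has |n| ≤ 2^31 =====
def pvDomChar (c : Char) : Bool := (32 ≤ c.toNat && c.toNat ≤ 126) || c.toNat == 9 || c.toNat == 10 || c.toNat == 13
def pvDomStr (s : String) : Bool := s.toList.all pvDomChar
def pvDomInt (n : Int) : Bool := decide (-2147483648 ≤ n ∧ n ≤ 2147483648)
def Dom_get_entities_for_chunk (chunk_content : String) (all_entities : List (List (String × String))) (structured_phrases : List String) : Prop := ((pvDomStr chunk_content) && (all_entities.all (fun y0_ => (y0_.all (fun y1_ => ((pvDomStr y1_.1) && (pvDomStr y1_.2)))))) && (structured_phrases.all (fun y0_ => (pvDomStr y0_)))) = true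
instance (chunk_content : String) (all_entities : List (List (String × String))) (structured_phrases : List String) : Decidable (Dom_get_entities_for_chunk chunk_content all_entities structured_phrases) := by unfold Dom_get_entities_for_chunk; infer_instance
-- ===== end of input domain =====

-- B dedups entities by lowercased stripped name into an ordered dict first, then filters the
-- distinct names by one substring test each, instead of A's per-entity test with a seen-set
-- (objective: alternative; equal return value proved below).


-- ===== PORT A =====
-- entity.get("name", "") on the entity association list (first-match lookup)
def pvEntityName (entity : List (String × String)) : String :=
  (PySem.Dict.mk entity).getD "name" ""

def get_entities_for_chunk (chunk_content : String) (all_entities : List (List (String × String))) (_structured_phrases : List String) : List (List (String × String)) :=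
  let chunk_lower := PySem.Str.lower chunk_content
  let st := all_entities.foldl
    (fun (st : List (List (String × String)) × PySem.Set String) entity =>
      let name := PySem.Str.strip (pvEntityName entity)
      let name_lower := PySem.Str.lower name
      if PySem.Str.isIn name_lower chunk_lower && !(PySem.Set.contains st.2 name_lower) then
        (st.1 ++ [entity], PySem.Set.add st.2 name_lower)
      else st)
    ([], PySem.Set.empty)
  st.1

-- ===== PORT B =====
def get_entities_for_chunk_alt (chunk_content : String) (all_entities : List (List (String × String))) (_structured_phrases : List String) : List (List (String × String)) :=
  let chunk_lower := PySem.Str.lower chunk_content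
  let first := all_entities.foldl
    (fun (d : PySem.Dict String (List (String × String))) entity =>
      let key := PySem.Str.lower (PySem.Str.strip (pvEntityName entity))
      if d.contains key then d else d.insert key entity)
    PySem.Dict.empty
  (first.items.filter (fun kv => PySem.Str.isIn kv.1 chunk_lower)).map Prod.snd

-- ===== PRECONDITION & SPEC =====
def Spec_get_entities_for_chunk (chunk_content : String) (all_entities : List (List (String × String))) (structured_phrases : List String) (out : List (List (String × String))) : Prop := out = get_entities_for_chunk_alt chunk_content all_entities structured_phrases
instance (chunk_content : String) (all_entities : List (List (String × String))) (structured_phrases : List String) (out : List (List (String × String))) : Decidable (Spec_get_entities_for_chunk chunk_content all_entities structured_phrases out) := by unfold Spec_get_entities_for_chunk; infer_instance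

-- ===== CLAIM (what is proved, stated in full; the proofs are below) =====
def Claim_equal_get_entities_for_chunk : Prop := ∀ (chunk_content : String) (all_entities : List (List (String × String))) (structured_phrases : List String), Dom_get_entities_for_chunk chunk_content all_entities structured_phrases → Spec_get_entities_for_chunk chunk_content all_entities structured_phrases (get_entities_for_chunk chunk_content all_entities structured_phrases)

-- ===== LEMMAS AND PROOFS =====

theorem pv_contains_add (s : PySem.Set String) (x k : String) :
    PySem.Set.contains (PySem.Set.add s x) k = (PySem.Set.contains s k || k == x) := by
  by_cases hk : k = x
  · subst hk
    by_cases hx : k ∈ s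
    · rw [PySem.Set.add_of_mem hx]; simp [PySem.Set.contains, hx]
    · rw [PySem.Set.add_of_not_mem hx]; simp [PySem.Set.contains]
  · rw [beq_eq_false_iff_ne.mpr hk, Bool.or_false]
    by_cases hx : x ∈ s
    · rw [PySem.Set.add_of_mem hx]
    · rw [PySem.Set.add_of_not_mem hx]; simp [PySem.Set.contains, hk]

theorem pv_items_insert_new {α : Type} (d : PySem.Dict String α) (k : String) (v : α)
    (h : d.contains k = false) : (d.insert k v).items = d.items ++ [(k, v)] := by
  simp [PySem.Dict.insert, h]

theorem pv_contains_insert_new {α : Type} (d : PySem.Dict String α) (k : String) (v : α)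
    (h : d.contains k = false) (k' : String) :
    (d.insert k v).contains k' = (d.contains k' || k == k') := by
  simp [PySem.Dict.contains, pv_items_insert_new d k v h]

-- the loop invariant: A's (acc, seen) state is determined by B's dict d
-- (acc = the values of d whose key passes `test`, seen = the keys of d that pass `test`)
theorem pv_loop {α : Type} (key : α → String) (test : String → Bool) (l : List α) :
    ∀ (d : PySem.Dict String α) (acc : List α) (seen : PySem.Set String),
      acc = (d.items.filter (fun kv => test kv.1)).map Prod.snd →
      (∀ k, PySem.Set.contains seen k = (d.contains k && test k)) →
      (l.foldl (fun st e =>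
          if test (key e) && !(PySem.Set.contains st.2 (key e)) then
            (st.1 ++ [e], PySem.Set.add st.2 (key e))
          else st) (acc, seen)).1
      = (((l.foldl (fun d e =>
            if d.contains (key e) then d else d.insert (key e) e) d).items).filter
          (fun kv => test kv.1)).map Prod.snd := by
  induction l with
  | nil => intro d acc seen hacc _; simpa using hacc
  | cons e t ih =>
    intro d acc seen hacc hseen
    simp only [List.foldl_cons]
    by_cases hc : d.contains (key e) = true
    · rw [if_pos hc]
      have hcond : (test (key e) && !PySem.Set.contains seen (key e)) = false := by
        rw [hseen, hc]; cases test (key e) <;> simp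
      rw [hcond]
      simp only [Bool.false_eq_true, if_false]
      exact ih d acc seen hacc hseen
    · have hc' : d.contains (key e) = false := by simpa using hc
      rw [if_neg hc]
      have hitems := pv_items_insert_new d (key e) e hc'
      have hs : PySem.Set.contains seen (key e) = false := by rw [hseen, hc']; simp
      by_cases hin : test (key e) = true
      · have hcond : (test (key e) && !PySem.Set.contains seen (key e)) = true := by
          rw [hin, hs]; rfl
        rw [hcond]
        simp only [if_true]
        apply ih
        · rw [hitems]; simp [List.filter_append, hin, hacc]
        · intro k'
          rw [pv_contains_add, hseen k', pv_contains_insert_new d (key e) e hc' k']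
          by_cases hkk : k' = key e
          · subst hkk; simp [hin, hc']
          · rw [beq_eq_false_iff_ne.mpr hkk, beq_eq_false_iff_ne.mpr (Ne.symm hkk)]
            simp
      · have hin' : test (key e) = false := by simpa using hin
        have hcond : (test (key e) && !PySem.Set.contains seen (key e)) = false := by
          rw [hin']; rfl
        rw [hcond]
        simp only [Bool.false_eq_true, if_false]
        apply ih
        · rw [hitems]; simp [List.filter_append, hin', hacc]
        · intro k'
          rw [hseen k', pv_contains_insert_new d (key e) e hc' k']
          by_cases hkk : k' = key e
          · subst hkk; simp [hin', hc']
          · rw [beq_eq_false_iff_ne.mpr (Ne.symm hkk)]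
            simp

-- ===== VERDICT (by name: the statement is the Claim_ definition above) =====
theorem get_entities_for_chunk_spec : Claim_equal_get_entities_for_chunk := by
  intro chunk_content all_entities structured_phrases _
  unfold Spec_get_entities_for_chunk get_entities_for_chunk get_entities_for_chunk_alt
  exact pv_loop (fun e => PySem.Str.lower (PySem.Str.strip (pvEntityName e)))
    (fun k => PySem.Str.isIn k (PySem.Str.lower chunk_content)) all_entities
    PySem.Dict.empty [] PySem.Set.empty
    (by simp [PySem.Dict.empty])
    (by intro k; simp [PySem.Set.contains, PySem.Set.empty, PySem.Dict.empty, PySem.Dict.contains])
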